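-- pv_equiv track=rewrite | github.com/Proccyon/Chicken-Seller | Chicken seller/HtmlParser.py | CalcMaxProfit
-- ===== SOURCE A (Python) =====
-- def CalcMaxProfit(PriceList):
--     MaxProfit = 0
--     MaxLoss = 0
--     for i in range(len(PriceList)-1):
--         DeltaPrice = PriceList[i+1]-PriceList[i]
--         if(DeltaPrice > 0):
--             MaxProfit += DeltaPrice
--         if(DeltaPrice < 0):
--             MaxLoss -= DeltaPrice
--
--     return MaxProfit,MaxLoss
-- ===== SOURCE B (Python) =====
-- def CalcMaxProfit(PriceList):
--     # Divide and conquer on index segments: the (profit, loss) of a segment is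
--     # the componentwise sum of its two halves' (profit, loss), since the set of
--     # consecutive deltas of [lo..hi] is the disjoint union of those of [lo..mid]
--     # and [mid..hi].
--     def go(lo, hi):
--         if hi - lo < 1:
--             return (0, 0)
--         if hi - lo == 1:
--             d = PriceList[hi] - PriceList[lo]
--             if d > 0:
--                 return (d, 0)
--             if d < 0:
--                 return (0, -d)
--             return (0, 0)
--         mid = (lo + hi) // 2
--         p1, l1 = go(lo, mid)
--         p2, l2 = go(mid, hi)
--         return (p1 + p2, l1 + l2)
--     return go(0, len(PriceList) - 1)
-- ===== Notes on version B (the rewrite author's own statement) =====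
-- stated objective: alternative
-- what changed: Replaces A's linear branch-accumulating scan by a recursive divide-and-conquer over index segments, splitting at the midpoint and summing the two halves' (profit, loss) pairs componentwise.
import Mathlib
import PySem

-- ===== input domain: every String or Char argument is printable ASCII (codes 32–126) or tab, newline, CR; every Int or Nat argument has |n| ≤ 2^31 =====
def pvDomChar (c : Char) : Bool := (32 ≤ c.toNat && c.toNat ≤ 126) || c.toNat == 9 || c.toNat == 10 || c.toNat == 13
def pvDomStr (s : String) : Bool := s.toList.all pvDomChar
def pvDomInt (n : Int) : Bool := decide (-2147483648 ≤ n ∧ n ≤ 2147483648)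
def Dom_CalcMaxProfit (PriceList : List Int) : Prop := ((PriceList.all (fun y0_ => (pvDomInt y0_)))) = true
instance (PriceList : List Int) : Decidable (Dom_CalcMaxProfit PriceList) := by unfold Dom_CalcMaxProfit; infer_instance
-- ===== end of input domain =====

-- B replaces A's linear branch-accumulating scan by a divide-and-conquer recursion
-- over index segments, summing the two halves' (profit, loss) componentwise.

-- ===== PORT A =====
def CalcMaxProfit (PriceList : List Int) : Int × Int :=
  (PySem.List.pyRange 0 ((PriceList.length : Int) - 1) 1).foldl
    (fun (acc : Int × Int) i =>
      let DeltaPrice := PySem.List.pyGetD PriceList (i + 1) 0 - PySem.List.pyGetD PriceList i 0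
      let MaxProfit := if DeltaPrice > 0 then acc.1 + DeltaPrice else acc.1
      let MaxLoss := if DeltaPrice < 0 then acc.2 - DeltaPrice else acc.2
      (MaxProfit, MaxLoss)) (0, 0)

-- ===== PORT B =====
/-- The inner recursive `go(lo, hi)` of Source B: (profit, loss) over the segment lo..hi.
    `fuel` only makes the halving recursion structural; it is never exhausted when
    `(hi - lo).toNat < fuel` (lemma `pvGo_eq_pvSeg`). -/
def pvGo (xs : List Int) (fuel : Nat) (lo hi : Int) : Int × Int :=
  match fuel with
  | 0 => (0, 0)
  | fuel + 1 =>
    if hi - lo < 1 then (0, 0)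
    else if hi - lo = 1 then
      let d := PySem.List.pyGetD xs hi 0 - PySem.List.pyGetD xs lo 0
      if d > 0 then (d, 0)
      else if d < 0 then (0, -d)
      else (0, 0)
    else
      let mid := PySem.Int.floordiv (lo + hi) 2
      let r1 := pvGo xs fuel lo mid
      let r2 := pvGo xs fuel mid hi
      (r1.1 + r2.1, r1.2 + r2.2)

def CalcMaxProfit_alt (PriceList : List Int) : Int × Int :=
  pvGo PriceList (PriceList.length + 1) 0 ((PriceList.length : Int) - 1)

-- ===== PRECONDITION & SPEC =====
def Spec_CalcMaxProfit (PriceList : List Int) (out : Int × Int) : Prop := out = CalcMaxProfit_alt PriceList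
instance (PriceList : List Int) (out : Int × Int) : Decidable (Spec_CalcMaxProfit PriceList out) := by unfold Spec_CalcMaxProfit; infer_instance

-- ===== CLAIM (what is proved, stated in full; the proofs are below) =====
def Claim_equal_CalcMaxProfit : Prop := ∀ (PriceList : List Int), Dom_CalcMaxProfit PriceList → Spec_CalcMaxProfit PriceList (CalcMaxProfit PriceList)

-- ===== LEMMAS AND PROOFS =====

/-- Left-to-right (profit, loss) over the segment lo..hi: the common reference point. -/
def pvSeg (xs : List Int) (lo hi : Int) : Int × Int :=
  if hi ≤ lo then (0, 0)
  else
    let d := PySem.List.pyGetD xs (lo + 1) 0 - PySem.List.pyGetD xs lo 0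
    let r := pvSeg xs (lo + 1) hi
    ((if d > 0 then d else 0) + r.1, (if d < 0 then -d else 0) + r.2)
termination_by (hi - lo).toNat
decreasing_by omega

lemma pvSeg_base (xs : List Int) (lo hi : Int) (h : hi ≤ lo) : pvSeg xs lo hi = (0, 0) := by
  rw [pvSeg, if_pos h]

lemma pvSeg_step (xs : List Int) (lo hi : Int) (h : lo < hi) :
    pvSeg xs lo hi =
      (((if PySem.List.pyGetD xs (lo + 1) 0 - PySem.List.pyGetD xs lo 0 > 0 then
           PySem.List.pyGetD xs (lo + 1) 0 - PySem.List.pyGetD xs lo 0 else 0) +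
         (pvSeg xs (lo + 1) hi).1),
       ((if PySem.List.pyGetD xs (lo + 1) 0 - PySem.List.pyGetD xs lo 0 < 0 then
           -(PySem.List.pyGetD xs (lo + 1) 0 - PySem.List.pyGetD xs lo 0) else 0) +
         (pvSeg xs (lo + 1) hi).2)) := by
  rw [pvSeg, if_neg (by omega)]

lemma pvSeg_split (xs : List Int) (mid : Int) : ∀ (n : Nat) (lo hi : Int),
    (mid - lo).toNat = n → lo ≤ mid → mid ≤ hi →
    pvSeg xs lo hi = ((pvSeg xs lo mid).1 + (pvSeg xs mid hi).1,
                      (pvSeg xs lo mid).2 + (pvSeg xs mid hi).2) := by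
  intro n
  induction n with
  | zero =>
    intro lo hi hn h1 h2
    have hme : mid = lo := by omega
    rw [hme, pvSeg_base xs lo lo le_rfl]
    simp
  | succ n ih =>
    intro lo hi hn h1 h2
    have hlt : lo < mid := by omega
    rw [pvSeg_step xs lo hi (by omega), pvSeg_step xs lo mid hlt,
        ih (lo + 1) hi (by omega) (by omega) h2]
    simp only [Prod.mk.injEq]
    constructor <;> ring

lemma pvGo_eq_pvSeg (xs : List Int) : ∀ (fuel : Nat) (lo hi : Int),
    (hi - lo).toNat < fuel → pvGo xs fuel lo hi = pvSeg xs lo hi := by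
  intro fuel
  induction fuel with
  | zero => intro lo hi h; omega
  | succ fuel ih =>
    intro lo hi hf
    rw [pvGo]
    by_cases h1 : hi - lo < 1
    · rw [if_pos h1, pvSeg_base xs lo hi (by omega)]
    · by_cases h2 : hi - lo = 1
      · have : hi = lo + 1 := by omega
        subst this
        rw [pvSeg_step xs lo (lo + 1) (by omega), pvSeg_base xs (lo + 1) (lo + 1) le_rfl]
        simp only [if_neg h1, if_pos h2]
        split_ifs <;> simp <;> omega
      · simp only [if_neg h1, if_neg h2]
        have hge : lo + 2 ≤ hi := by omega
        have h := PySem.Int.floordiv_mul_add_mod (lo + hi) 2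
        have hm : PySem.Int.mod (lo + hi) 2 = (lo + hi) % 2 :=
          PySem.Int.mod_eq_emod_of_pos (by omega)
        rw [hm] at h
        set mid := PySem.Int.floordiv (lo + hi) 2 with hmid
        have hb1 : lo + 1 ≤ mid := by omega
        have hb2 : mid ≤ hi - 1 := by omega
        rw [ih lo mid (by omega), ih mid hi (by omega)]
        exact (pvSeg_split xs mid ((mid - lo).toNat) lo hi rfl (by omega) (by omega)).symm

/-- A's fold over `range(lo, hi)` accumulates exactly `pvSeg`. -/
lemma foldA_eq_pvSeg (xs : List Int) : ∀ (lo hi : Int) (p l : Int),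
    (PySem.List.pyRange lo hi 1).foldl
      (fun (acc : Int × Int) i =>
        let d := PySem.List.pyGetD xs (i + 1) 0 - PySem.List.pyGetD xs i 0
        let MaxProfit := if d > 0 then acc.1 + d else acc.1
        let MaxLoss := if d < 0 then acc.2 - d else acc.2
        (MaxProfit, MaxLoss)) (p, l)
      = (p + (pvSeg xs lo hi).1, l + (pvSeg xs lo hi).2) := by
  intro lo hi
  induction hn : (hi - lo).toNat generalizing lo with
  | zero =>
    intro p l
    rw [PySem.List.pyRange_one_eq_nil (by omega), pvSeg_base xs lo hi (by omega)]
    simp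
  | succ n ih =>
    intro p l
    rw [PySem.List.pyRange_one_cons (by omega), List.foldl_cons]
    simp only
    rw [ih (lo + 1) (by omega), pvSeg_step xs lo hi (by omega)]
    simp only [Prod.mk.injEq]
    constructor <;> split_ifs <;> ring

-- ===== VERDICT (by name: the statement is the Claim_ definition above) =====
theorem CalcMaxProfit_spec : Claim_equal_CalcMaxProfit := by
  intro xs _
  unfold Spec_CalcMaxProfit CalcMaxProfit CalcMaxProfit_alt
  rw [foldA_eq_pvSeg, pvGo_eq_pvSeg xs (xs.length + 1) 0 ((xs.length : Int) - 1) (by omega)]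
  simp
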